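-- pv_equiv track=rewrite | github.com/5nizza/party-elli | src/translation2uct/ltl2ba.py | _unwind_label
-- ===== SOURCE A (Python) =====
-- import itertools
--
-- def _unwind_label(pattern_lbl, vars):
--     lbl_vars = pattern_lbl.keys()
--     free_vars = vars.difference(lbl_vars)
--     free_vars_values = list(itertools.product([True, False], repeat=len(free_vars)))
--
--     if len(free_vars_values) is 0:
--         return pattern_lbl
--
--     concrete_labels = []
--     for free_vars_value in free_vars_values:
--         free_vars_lbl = {}
--         for i, free_var in enumerate(free_vars):
--             free_vars_lbl[free_var] = free_vars_value[i]
--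
--         concrete_lbl = dict(pattern_lbl)
--         concrete_lbl.update(free_vars_lbl)
--         concrete_labels.append(concrete_lbl)
--
--     return concrete_labels
-- ===== SOURCE B (Python) =====
-- def _unwind_label(pattern_lbl, vars_):
--     # second parameter is Python's set of variable names ('vars' in A; renamed
--     # only because the harness refuses the shadowed builtin name)
--     free_vars = vars_.difference(pattern_lbl.keys())
--
--     acc = [dict(pattern_lbl)]
--     for free_var in free_vars:
--         acc = [{**d, free_var: val} for d in acc for val in (True, False)]
--     return acc
-- ===== Notes on version B (the rewrite author's own statement) =====
-- stated objective: simpler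
-- what changed: Replaces the materialised itertools.product table plus per-tuple enumerate/update dict assembly with an incremental fold: start from [copy of pattern_lbl] and, for each free variable, split every partial label into its True and False extensions; this also drops the dead guard (product is never empty) that would have returned the bare dict.
import Mathlib
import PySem

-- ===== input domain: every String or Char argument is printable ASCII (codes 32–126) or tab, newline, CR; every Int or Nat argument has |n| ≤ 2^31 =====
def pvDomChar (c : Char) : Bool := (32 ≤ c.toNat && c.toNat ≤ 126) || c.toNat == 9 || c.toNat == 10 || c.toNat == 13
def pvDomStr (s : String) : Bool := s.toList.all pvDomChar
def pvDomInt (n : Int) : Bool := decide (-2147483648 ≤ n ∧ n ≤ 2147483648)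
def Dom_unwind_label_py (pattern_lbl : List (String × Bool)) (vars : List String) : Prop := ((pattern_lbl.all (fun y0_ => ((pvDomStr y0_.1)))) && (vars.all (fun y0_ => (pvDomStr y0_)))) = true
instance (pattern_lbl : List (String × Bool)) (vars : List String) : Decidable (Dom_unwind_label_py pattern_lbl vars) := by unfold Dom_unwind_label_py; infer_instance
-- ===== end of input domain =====

-- B replaces the materialised product table + per-tuple dict assembly with an incremental
-- fold extending each partial label by True/False per free variable (objective: simpler).


-- ===== PORT A =====
-- dict assignment d[k] = v on an association list: overwrite first match in place, else append
def dictInsert (d : List (String × Bool)) (k : String) (v : Bool) : List (String × Bool) :=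
  if d.any (fun p => p.1 == k) then d.map (fun p => if p.1 == k then (k, v) else p)
  else d ++ [(k, v)]

-- itertools.product([True, False], repeat=n): first coordinate varies slowest
def boolProduct : Nat → List (List Bool)
  | 0 => [[]]
  | n + 1 => ([true, false]).flatMap (fun b => (boolProduct n).map (b :: ·))

def unwind_label_py (pattern_lbl : List (String × Bool)) (vars : List String) : List (List (String × Bool)) :=
  let lbl_vars := pattern_lbl.map Prod.fst
  let free_vars := PySem.Set.diff (PySem.Set.ofList vars) lbl_vars
  let free_vars_values := boolProduct free_vars.length
  -- Python's dead guard 'if len(free_vars_values) is 0: return pattern_lbl' never fires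
  -- (the product list is never empty); it would return a dict, not a list, so the nearest
  -- typed transliteration returns [pattern_lbl] on that unreachable branch.
  if free_vars_values.length = 0 then [pattern_lbl]
  else
    free_vars_values.foldl (fun concrete_labels free_vars_value =>
      let free_vars_lbl := (PySem.List.enumerate free_vars 0).foldl
        (fun lbl p => dictInsert lbl p.2 ((PySem.List.pyGet? free_vars_value p.1).getD false)) []
      let concrete_lbl := free_vars_lbl.foldl (fun d p => dictInsert d p.1 p.2) pattern_lbl
      concrete_labels ++ [concrete_lbl]) []

-- ===== PORT B =====
def unwind_label_py_alt (pattern_lbl : List (String × Bool)) (vars : List String) : List (List (String × Bool)) :=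
  let free_vars := PySem.Set.diff (PySem.Set.ofList vars) (pattern_lbl.map Prod.fst)
  free_vars.foldl
    (fun acc v => acc.flatMap (fun d => [dictInsert d v true, dictInsert d v false]))
    [pattern_lbl]

-- ===== PRECONDITION & SPEC =====
def Spec_unwind_label_py (pattern_lbl : List (String × Bool)) (vars : List String) (out : List (List (String × Bool))) : Prop := out = unwind_label_py_alt pattern_lbl vars
instance (pattern_lbl : List (String × Bool)) (vars : List String) (out : List (List (String × Bool))) : Decidable (Spec_unwind_label_py pattern_lbl vars out) := by unfold Spec_unwind_label_py; infer_instance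

-- ===== CLAIM (what is proved, stated in full; the proofs are below) =====
def Claim_equal_unwind_label_py : Prop := ∀ (pattern_lbl : List (String × Bool)) (vars : List String), Dom_unwind_label_py pattern_lbl vars → Spec_unwind_label_py pattern_lbl vars (unwind_label_py pattern_lbl vars)

-- ===== LEMMAS AND PROOFS =====

theorem dictInsert_of_not_mem (d : List (String × Bool)) (k : String) (v : Bool)
    (h : k ∉ d.map Prod.fst) : dictInsert d k v = d ++ [(k, v)] := by
  unfold dictInsert
  rw [if_neg]
  simp only [List.any_eq_true, beq_iff_eq, not_exists, not_and]
  intro p hp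
  exact fun hk => h (List.mem_map.mpr ⟨p, hp, hk⟩)

theorem boolProduct_ne_nil (n : Nat) : boolProduct n ≠ [] := by
  induction n with
  | zero => simp [boolProduct]
  | succ n ih =>
    simp only [boolProduct, List.flatMap_cons, List.flatMap_nil, List.append_nil, ne_eq,
      List.append_eq_nil_iff, List.map_eq_nil_iff]
    exact fun h => ih h.1

theorem length_mem_boolProduct (n : Nat) (vs : List Bool) (h : vs ∈ boolProduct n) :
    vs.length = n := by
  induction n generalizing vs with
  | zero => simp [boolProduct] at h; simp [h]
  | succ n ih =>
    simp only [boolProduct, List.flatMap_cons, List.flatMap_nil, List.append_nil,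
      List.mem_append, List.mem_map] at h
    rcases h with ⟨ws, hw, rfl⟩ | ⟨ws, hw, rfl⟩ <;> simp [ih _ hw]

theorem foldl_append_singleton {α β : Type} (f : α → β) (l : List α) (acc : List β) :
    l.foldl (fun a x => a ++ [f x]) acc = acc ++ l.map f := by
  induction l generalizing acc with
  | nil => simp
  | cons x xs ih => simp [List.foldl_cons, ih, List.append_assoc]

-- building a dict by inserting pairwise-distinct fresh keys appends the pair list
theorem foldl_dictInsert_fresh (ps : List (String × Bool)) (d : List (String × Bool))
    (hn : (ps.map Prod.fst).Nodup) (hf : ∀ p ∈ ps, p.1 ∉ d.map Prod.fst) :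
    ps.foldl (fun d p => dictInsert d p.1 p.2) d = d ++ ps := by
  induction ps generalizing d with
  | nil => simp
  | cons p ps ih =>
    simp only [List.map_cons, List.nodup_cons] at hn
    rw [List.foldl_cons, dictInsert_of_not_mem _ _ _ (hf p (by simp)),
        ih (d ++ [(p.1, p.2)]) hn.2]
    · simp
    · intro q hq
      simp only [List.map_append, List.mem_append, List.map_cons, List.map_nil,
        List.mem_singleton, not_or]
      refine ⟨hf q (by simp [hq]), fun hqp => hn.1 ?_⟩
      rw [← hqp]
      exact List.mem_map.mpr ⟨q, hq, rfl⟩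

-- reading the tuple at enumerate indices recovers zip with the suffix of the tuple
theorem map_enumerate_pyGet (fvs : List String) (vs : List Bool) (s : Nat)
    (h : s + fvs.length ≤ vs.length) :
    (PySem.List.enumerate fvs (s : Int)).map
        (fun p => (p.2, (PySem.List.pyGet? vs p.1).getD false)) =
      fvs.zip (vs.drop s) := by
  induction fvs generalizing s with
  | nil => simp [PySem.List.enumerate_nil]
  | cons f fvs ih =>
    have hs : s < vs.length := by simp at h; omega
    rw [PySem.List.enumerate_cons, List.map_cons]
    dsimp only
    rw [PySem.List.pyGet?_natCast vs s, List.getElem?_eq_getElem hs]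
    have hdrop : vs.drop s = vs[s] :: vs.drop (s + 1) := (List.getElem_cons_drop hs).symm
    rw [hdrop, List.zip_cons_cons]
    have hcast : ((s : Int) + 1) = ((s + 1 : Nat) : Int) := by push_cast; ring
    rw [hcast, ih (s + 1) (by simp at h ⊢; omega)]
    simp

theorem map_enumerate_pyGet_zero (fvs : List String) (vs : List Bool)
    (h : vs.length = fvs.length) :
    (PySem.List.enumerate fvs (0 : Int)).map
        (fun p => (p.2, (PySem.List.pyGet? vs p.1).getD false)) = fvs.zip vs := by
  have := map_enumerate_pyGet fvs vs 0 (by omega)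
  simpa using this

-- B's step distributes over append of accumulators
theorem foldl_step_append (fvs : List String) (as bs : List (List (String × Bool))) :
    fvs.foldl (fun acc v => acc.flatMap (fun d => [dictInsert d v true, dictInsert d v false])) (as ++ bs)
      = fvs.foldl (fun acc v => acc.flatMap (fun d => [dictInsert d v true, dictInsert d v false])) as
        ++ fvs.foldl (fun acc v => acc.flatMap (fun d => [dictInsert d v true, dictInsert d v false])) bs := by
  induction fvs generalizing as bs with
  | nil => simp
  | cons f fvs ih => simp only [List.foldl_cons, List.flatMap_append, ih]

-- main bridge: the product-tuple map equals B's incremental fold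
theorem main_lemma (fvs : List String) (d : List (String × Bool))
    (hn : fvs.Nodup) (hf : ∀ f ∈ fvs, f ∉ d.map Prod.fst) :
    (boolProduct fvs.length).map (fun vs => d ++ fvs.zip vs)
      = fvs.foldl (fun acc v => acc.flatMap (fun db => [dictInsert db v true, dictInsert db v false])) [d] := by
  induction fvs generalizing d with
  | nil => simp [boolProduct]
  | cons f fvs ih =>
    simp only [List.nodup_cons] at hn
    have hfresh : ∀ b : Bool, ∀ g ∈ fvs, g ∉ (d ++ [(f, b)]).map Prod.fst := by
      intro b g hg
      simp only [List.map_append, List.mem_append, List.map_cons, List.map_nil,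
        List.mem_singleton, not_or]
      exact ⟨hf g (by simp [hg]), fun hgf => hn.1 (hgf ▸ hg)⟩
    have step1 : ∀ b : Bool,
        (boolProduct fvs.length).map (fun vs => d ++ (f :: fvs).zip (b :: vs))
          = fvs.foldl (fun acc v => acc.flatMap (fun db => [dictInsert db v true, dictInsert db v false])) [d ++ [(f, b)]] := by
      intro b
      have heq : (fun vs => d ++ (f :: fvs).zip (b :: vs))
           = (fun vs => (d ++ [(f, b)]) ++ fvs.zip vs) := by
        funext vs; simp [List.zip_cons_cons]
      rw [heq, ih (d ++ [(f, b)]) hn.2 (hfresh b)]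
    calc (boolProduct (f :: fvs).length).map (fun vs => d ++ (f :: fvs).zip vs)
        = (boolProduct fvs.length).map (fun vs => d ++ (f :: fvs).zip (true :: vs))
          ++ (boolProduct fvs.length).map (fun vs => d ++ (f :: fvs).zip (false :: vs)) := by
          simp only [List.length_cons, boolProduct, List.flatMap_cons, List.flatMap_nil,
            List.append_nil, List.map_append, List.map_map]
          rfl
      _ = fvs.foldl (fun acc v => acc.flatMap (fun db => [dictInsert db v true, dictInsert db v false])) [d ++ [(f, true)]]
          ++ fvs.foldl (fun acc v => acc.flatMap (fun db => [dictInsert db v true, dictInsert db v false])) [d ++ [(f, false)]] := by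
          rw [step1 true, step1 false]
      _ = _ := by
          rw [← foldl_step_append]
          simp only [List.foldl_cons, List.flatMap_cons, List.flatMap_nil, List.append_nil,
            dictInsert_of_not_mem d f true (hf f (by simp)),
            dictInsert_of_not_mem d f false (hf f (by simp))]
          rfl

-- the two ports agree once the free-variable list is known Nodup and fresh
theorem ports_eq_of (pattern_lbl : List (String × Bool)) (fvs : List String)
    (hn : fvs.Nodup) (hf : ∀ f ∈ fvs, f ∉ pattern_lbl.map Prod.fst) :
    (if (boolProduct fvs.length).length = 0 then [pattern_lbl]
     else (boolProduct fvs.length).foldl (fun concrete_labels free_vars_value =>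
        let free_vars_lbl := (PySem.List.enumerate fvs 0).foldl
          (fun lbl p => dictInsert lbl p.2 ((PySem.List.pyGet? free_vars_value p.1).getD false)) []
        let concrete_lbl := free_vars_lbl.foldl (fun d p => dictInsert d p.1 p.2) pattern_lbl
        concrete_labels ++ [concrete_lbl]) [])
      = fvs.foldl (fun acc v => acc.flatMap (fun d => [dictInsert d v true, dictInsert d v false])) [pattern_lbl] := by
  rw [if_neg (by simpa using boolProduct_ne_nil fvs.length)]
  rw [foldl_append_singleton
        (fun free_vars_value =>
          ((PySem.List.enumerate fvs 0).foldl
            (fun lbl p => dictInsert lbl p.2 ((PySem.List.pyGet? free_vars_value p.1).getD false)) []).foldl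
            (fun d p => dictInsert d p.1 p.2) pattern_lbl)]
  have hconc : ∀ vs ∈ boolProduct fvs.length,
      ((PySem.List.enumerate fvs (0 : Int)).foldl
          (fun lbl p => dictInsert lbl p.2 ((PySem.List.pyGet? vs p.1).getD false)) []).foldl
        (fun d p => dictInsert d p.1 p.2) pattern_lbl
      = pattern_lbl ++ fvs.zip vs := by
    intro vs hvs
    have hlen : vs.length = fvs.length := length_mem_boolProduct _ _ hvs
    have hzip : (fvs.zip vs).map Prod.fst = fvs := List.map_fst_zip (le_of_eq hlen.symm)
    have hzipnodup : ((fvs.zip vs).map Prod.fst).Nodup := by rw [hzip]; exact hn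
    have hinner : (PySem.List.enumerate fvs (0 : Int)).foldl
        (fun lbl p => dictInsert lbl p.2 ((PySem.List.pyGet? vs p.1).getD false)) []
        = fvs.zip vs := by
      have hm := congrArg
        (List.foldl (fun lbl (q : String × Bool) => dictInsert lbl q.1 q.2) [])
        (map_enumerate_pyGet_zero fvs vs hlen)
      rw [List.foldl_map] at hm
      dsimp only at hm
      rw [hm, foldl_dictInsert_fresh _ _ hzipnodup (by simp)]
      simp
    rw [hinner]
    refine foldl_dictInsert_fresh _ _ hzipnodup ?_
    intro p hp
    refine hf p.1 ?_
    rw [← hzip]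
    exact List.mem_map.mpr ⟨p, hp, rfl⟩
  rw [List.nil_append, List.map_congr_left hconc]
  exact main_lemma fvs pattern_lbl hn hf

-- ===== VERDICT (by name: the statement is the Claim_ definition above) =====
theorem unwind_label_py_spec : Claim_equal_unwind_label_py := by
  intro pattern_lbl vars _
  unfold Spec_unwind_label_py unwind_label_py unwind_label_py_alt
  refine ports_eq_of pattern_lbl (PySem.Set.diff (PySem.Set.ofList vars) (pattern_lbl.map Prod.fst)) ?_ ?_
  · exact PySem.Set.nodup_diff _ _ (PySem.Set.nodup_ofList vars)
  · intro f hf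
    exact ((PySem.Set.mem_diff _ _ _).mp hf).2
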